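-- pv_equiv track=rewrite | github.com/jenniferhuangg/ConcertCloud | app/routes_events.py | _row_depth
-- ===== SOURCE A (Python) =====
-- def _row_depth(row: str | None) -> int:
--     if not row:
--         return 10
--     if row.isdigit():
--         return int(row)
--     alpha = "".join(ch for ch in row.upper() if ch.isalpha())
--     if not alpha:
--         return 10
--     depth = 0
--     for ch in alpha:
--         depth = depth * 26 + (ord(ch) - 64)  # A=1
--     return depth
-- ===== SOURCE B (Python) =====
-- def _base26(vals):
--     if len(vals) == 1:
--         return vals[0]
--     mid = len(vals) // 2
--     return _base26(vals[:mid]) * 26 ** (len(vals) - mid) + _base26(vals[mid:])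
--
-- def _row_depth(row: str | None) -> int:
--     if row and row.isdigit():
--         return int(row)
--     vals = [ord(ch) - 96 for ch in (row or "").lower() if 'a' <= ch <= 'z']
--     if not vals:
--         return 10
--     return _base26(vals)
-- ===== Notes on version B (the rewrite author's own statement) =====
-- stated objective: alternative
-- what changed: B merges the falsy/isdigit guards into one short-circuit test, lowercases and range-tests letters into a numeric value list, and replaces A's left-to-right Horner accumulator loop with a divide-and-conquer base-26 evaluation that splits the digit list in half and combines the halves with one power of 26.
import Mathlib
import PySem

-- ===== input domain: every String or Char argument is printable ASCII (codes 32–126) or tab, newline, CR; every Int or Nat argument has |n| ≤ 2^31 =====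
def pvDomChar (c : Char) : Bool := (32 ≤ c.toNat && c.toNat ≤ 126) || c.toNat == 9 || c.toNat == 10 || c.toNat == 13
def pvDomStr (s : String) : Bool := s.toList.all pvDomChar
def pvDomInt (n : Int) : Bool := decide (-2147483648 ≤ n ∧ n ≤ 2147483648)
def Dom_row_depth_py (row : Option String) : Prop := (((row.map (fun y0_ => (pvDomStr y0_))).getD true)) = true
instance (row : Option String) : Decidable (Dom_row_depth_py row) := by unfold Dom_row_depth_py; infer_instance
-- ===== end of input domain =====

-- B merges the guards, lowercases and range-tests letters into a numeric value list, and
-- replaces A's left-to-right Horner accumulator loop with a divide-and-conquer base-26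
-- evaluation that splits the digit list in half (alternative decomposition).


-- ===== PORT A =====
def row_depth_py (row : Option String) : Int :=
  match row with
  | none => 10
  | some s =>
    if s.toList = [] then 10
    else if PySem.Chars.strIsdigit s.toList then (PySem.Int.ofStr? s).getD 0
    else
      let alpha := (PySem.Chars.upper s.toList).filter PySem.Chars.isalpha
      if alpha = [] then 10
      else alpha.foldl (fun depth ch => depth * 26 + ((ch.toNat : Int) - 64)) 0

-- ===== PORT B =====
-- vals = [ord(ch) - 96 for ch in (row or "").lower() if 'a' <= ch <= 'z']
def rowDepthVals (l : List Char) : List Int :=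
  ((PySem.Chars.lower l).filter (fun ch => 'a' ≤ ch && ch ≤ 'z')).map
    (fun ch => (ch.toNat : Int) - 96)

-- _base26(vals): divide and conquer; vals[:mid] / vals[mid:] with 0 ≤ mid ≤ len are exactly
-- take/drop. Python's _base26 is never called on []; the length-0 guard only makes it total
-- (Python would recurse forever there).
def rowDepthNum (l : List Int) : Int :=
  if l.length = 1 then l.headD 0
  else if l.length = 0 then 0
  else
    rowDepthNum (l.take (l.length / 2)) * 26 ^ (l.length - l.length / 2)
      + rowDepthNum (l.drop (l.length / 2))
termination_by l.length
decreasing_by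
  · simp only [List.length_take]; omega
  · simp only [List.length_drop]; omega

def row_depth_py_alt (row : Option String) : Int :=
  if (match row with
      | none => false
      | some s => !s.toList.isEmpty && PySem.Chars.strIsdigit s.toList) then
    (PySem.Int.ofStr? (row.getD "")).getD 0
  else
    let vals := rowDepthVals (row.getD "").toList
    if vals = [] then 10
    else rowDepthNum vals

-- ===== PRECONDITION & SPEC =====
def Spec_row_depth_py (row : Option String) (out : Int) : Prop := out = row_depth_py_alt row
instance (row : Option String) (out : Int) : Decidable (Spec_row_depth_py row out) := by unfold Spec_row_depth_py; infer_instance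

-- ===== CLAIM (what is proved, stated in full; the proofs are below) =====
def Claim_equal_row_depth_py : Prop := ∀ (row : Option String), Dom_row_depth_py row → Spec_row_depth_py row (row_depth_py row)

-- ===== LEMMAS AND PROOFS =====

theorem char_le_toNat (c d : Char) : c ≤ d ↔ c.toNat ≤ d.toNat := Iff.rfl

theorem charOfNat_toNat (n : Nat) (h : n < 55296) : (Char.ofNat n).toNat = n := by
  unfold Char.ofNat Char.ofNatAux
  rw [dif_pos (by unfold Nat.isValidChar; omega)]
  simp [Char.toNat, UInt32.toNat_ofNatLT]

-- per-character: B's lowercase range test selects exactly A's alpha characters …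
theorem lower_range_eq_isalpha_upper (c : Char) :
    (('a' ≤ PySem.Chars.lowerChar c && PySem.Chars.lowerChar c ≤ 'z') : Bool)
      = PySem.Chars.isalpha (PySem.Chars.upperChar c) := by
  by_cases hu : 65 ≤ c.toNat ∧ c.toNat ≤ 90
  · have hiu : PySem.Chars.isupper c = true := by
      simp only [PySem.Chars.isupper, Bool.and_eq_true, decide_eq_true_eq, char_le_toNat]
      exact hu
    have hil : PySem.Chars.islower c = false := by
      simp only [PySem.Chars.islower, Bool.and_eq_false_iff, decide_eq_false_iff_not,
        char_le_toNat, show ('a').toNat = 97 from rfl]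
      left; omega
    rw [PySem.Chars.lowerChar, if_pos hiu, PySem.Chars.upperChar, if_neg (by simp [hil]),
      PySem.Chars.isalpha, hiu, Bool.true_or]
    have ht : (Char.ofNat (c.toNat + 32)).toNat = c.toNat + 32 := charOfNat_toNat _ (by omega)
    simp only [Bool.and_eq_true, decide_eq_true_eq, char_le_toNat, ht,
      show ('a').toNat = 97 from rfl, show ('z').toNat = 122 from rfl]
    omega
  · have hiu : PySem.Chars.isupper c = false := by
      simp only [PySem.Chars.isupper, Bool.and_eq_false_iff, decide_eq_false_iff_not,
        char_le_toNat, show ('A').toNat = 65 from rfl, show ('Z').toNat = 90 from rfl]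
      omega
    rw [PySem.Chars.lowerChar, if_neg (by simp [hiu])]
    by_cases hl : 97 ≤ c.toNat ∧ c.toNat ≤ 122
    · have hil : PySem.Chars.islower c = true := by
        simp only [PySem.Chars.islower, Bool.and_eq_true, decide_eq_true_eq, char_le_toNat]
        exact hl
      rw [PySem.Chars.upperChar, if_pos hil, PySem.Chars.isalpha, PySem.Chars.isupper]
      have ht : (Char.ofNat (c.toNat - 32)).toNat = c.toNat - 32 := charOfNat_toNat _ (by omega)
      simp only [Bool.and_eq_true, Bool.or_eq_true, decide_eq_true_eq, char_le_toNat, ht,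
        show ('a').toNat = 97 from rfl, show ('z').toNat = 122 from rfl,
        show ('A').toNat = 65 from rfl, show ('Z').toNat = 90 from rfl,
        PySem.Chars.islower]
      rw [Bool.eq_iff_iff]
      simp only [Bool.and_eq_true, Bool.or_eq_true, decide_eq_true_eq]
      omega
    · have hil : PySem.Chars.islower c = false := by
        simp only [PySem.Chars.islower, Bool.and_eq_false_iff, decide_eq_false_iff_not,
          char_le_toNat, show ('a').toNat = 97 from rfl, show ('z').toNat = 122 from rfl]
        omega
      rw [PySem.Chars.upperChar, if_neg (by simp [hil]), PySem.Chars.isalpha, hiu, hil]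
      simp only [Bool.false_or, PySem.Chars.islower] at hil ⊢
      exact hil

-- … and assigns the same numeric value (A=1, …, Z=26)
theorem lower_val_eq_upper_val (c : Char)
    (h : PySem.Chars.isalpha (PySem.Chars.upperChar c) = true) :
    ((PySem.Chars.lowerChar c).toNat : Int) - 96 = ((PySem.Chars.upperChar c).toNat : Int) - 64 := by
  by_cases hu : 65 ≤ c.toNat ∧ c.toNat ≤ 90
  · have hiu : PySem.Chars.isupper c = true := by
      simp only [PySem.Chars.isupper, Bool.and_eq_true, decide_eq_true_eq, char_le_toNat]
      exact hu
    have hil : PySem.Chars.islower c = false := by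
      simp only [PySem.Chars.islower, Bool.and_eq_false_iff, decide_eq_false_iff_not,
        char_le_toNat, show ('a').toNat = 97 from rfl]
      left; omega
    rw [PySem.Chars.lowerChar, if_pos hiu, PySem.Chars.upperChar, if_neg (by simp [hil]),
      charOfNat_toNat _ (by omega)]
    push_cast; ring
  · by_cases hl : 97 ≤ c.toNat ∧ c.toNat ≤ 122
    · have hil : PySem.Chars.islower c = true := by
        simp only [PySem.Chars.islower, Bool.and_eq_true, decide_eq_true_eq, char_le_toNat]
        exact hl
      have hiu : PySem.Chars.isupper c = false := by
        simp only [PySem.Chars.isupper, Bool.and_eq_false_iff, decide_eq_false_iff_not,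
          char_le_toNat, show ('A').toNat = 65 from rfl, show ('Z').toNat = 90 from rfl]
        omega
      rw [PySem.Chars.lowerChar, if_neg (by simp [hiu]), PySem.Chars.upperChar, if_pos hil,
        charOfNat_toNat _ (by omega)]
      omega
    · exfalso
      have hil : PySem.Chars.islower c = false := by
        simp only [PySem.Chars.islower, Bool.and_eq_false_iff, decide_eq_false_iff_not,
          char_le_toNat, show ('a').toNat = 97 from rfl, show ('z').toNat = 122 from rfl]
        omega
      rw [PySem.Chars.upperChar, if_neg (by simp [hil]), PySem.Chars.isalpha] at h
      simp only [Bool.or_eq_true, Bool.and_eq_true, decide_eq_true_eq, char_le_toNat,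
        PySem.Chars.isupper, PySem.Chars.islower,
        show ('a').toNat = 97 from rfl, show ('z').toNat = 122 from rfl,
        show ('A').toNat = 65 from rfl, show ('Z').toNat = 90 from rfl] at h
      omega

-- B's value list is A's alpha list mapped to its numeric values
theorem vals_eq_alpha (l : List Char) :
    rowDepthVals l
      = ((PySem.Chars.upper l).filter PySem.Chars.isalpha).map (fun ch => (ch.toNat : Int) - 64) := by
  induction l with
  | nil => rfl
  | cons c l ih =>
    simp only [rowDepthVals, PySem.Chars.lower, PySem.Chars.upper, List.map_cons,
      List.filter_cons] at *
    rw [lower_range_eq_isalpha_upper c]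
    by_cases h : PySem.Chars.isalpha (PySem.Chars.upperChar c) = true
    · simp only [h, if_pos, List.map_cons, ih, lower_val_eq_upper_val c h]
    · simp only [Bool.not_eq_true] at h
      simp only [h, Bool.false_eq_true, if_false, ih]

-- A's Horner fold with a general accumulator splits off a place-value term
theorem horner_shift (m : List Int) (a : Int) :
    m.foldl (fun depth v => depth * 26 + v) a
      = a * 26 ^ m.length + m.foldl (fun depth v => depth * 26 + v) 0 := by
  induction m generalizing a with
  | nil => simp
  | cons v m ih =>
    simp only [List.foldl_cons, List.length_cons]
    rw [ih (a * 26 + v), ih (0 * 26 + v)]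
    ring

-- Horner over a concatenation splits with one power of the base
theorem horner_append (a b : List Int) :
    (a ++ b).foldl (fun depth v => depth * 26 + v) 0
      = (a.foldl (fun depth v => depth * 26 + v) 0) * 26 ^ b.length
        + b.foldl (fun depth v => depth * 26 + v) 0 := by
  rw [List.foldl_append]
  exact horner_shift b _

-- B's divide-and-conquer evaluation is A's left-to-right Horner evaluation
theorem num_eq_horner (l : List Int) (h : l ≠ []) :
    rowDepthNum l = l.foldl (fun depth v => depth * 26 + v) 0 := by
  induction l using rowDepthNum.induct with
  | case1 l h1 =>
    obtain ⟨x, rfl⟩ := List.length_eq_one_iff.mp h1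
    simp [rowDepthNum]
  | case2 l h1 h0 =>
    exact absurd (List.length_eq_zero_iff.mp h0) h
  | case3 l h1 h0 ih1 ih2 =>
    rw [rowDepthNum, if_neg h1, if_neg h0]
    have hlen : 2 ≤ l.length := by
      rcases Nat.lt_or_ge l.length 2 with hh | hh
      · interval_cases hl : l.length <;> simp_all
      · exact hh
    have ht : l.take (l.length / 2) ≠ [] := by
      simp only [ne_eq, ← List.length_eq_zero_iff, List.length_take]; omega
    have hd : l.drop (l.length / 2) ≠ [] := by
      simp only [ne_eq, ← List.length_eq_zero_iff, List.length_drop]; omega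
    rw [ih1 ht, ih2 hd, ← List.length_drop, ← horner_append, List.take_append_drop]

-- ===== VERDICT (by name: the statement is the Claim_ definition above) =====
theorem row_depth_py_spec : Claim_equal_row_depth_py := by
  intro row _
  unfold Spec_row_depth_py
  cases row with
  | none => decide
  | some s =>
    simp only [row_depth_py, row_depth_py_alt, Option.getD_some]
    by_cases he : s.toList = []
    · rw [if_pos he, if_neg (by simp [he])]
      simp [rowDepthVals, he, PySem.Chars.lower]
    · rw [if_neg he]
      by_cases hd : PySem.Chars.strIsdigit s.toList = true
      · rw [if_pos hd, if_pos (by simp [he, hd, List.isEmpty_iff])]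
      · have hb : ¬((!s.toList.isEmpty && PySem.Chars.strIsdigit s.toList) = true) :=
          fun hcon => hd (((Bool.and_eq_true _ _).mp hcon).2)
        rw [if_neg hd, vals_eq_alpha]
        by_cases ha : (PySem.Chars.upper s.toList).filter PySem.Chars.isalpha = []
        · rw [if_pos ha, if_neg hb, if_pos (by rw [ha]; rfl)]
        · have hm : ((PySem.Chars.upper s.toList).filter PySem.Chars.isalpha).map
              (fun ch => (ch.toNat : Int) - 64) ≠ [] :=
            fun hcon => ha (List.map_eq_nil_iff.mp hcon)
          rw [if_neg ha, if_neg hb, if_neg hm, num_eq_horner _ hm, List.foldl_map]
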